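-- pv_equiv track=rewrite | github.com/MateuszCzerniawski/Wish-Sender-Web-App | SendPlanner.py | limit_dates
-- ===== SOURCE A (Python) =====
-- def limit_dates(dates, every):
--     counter = 1
--     tmp = [dates[0]]
--     while counter < len(dates):
--         counter += every
--         if counter < len(dates):
--             tmp.append(dates[counter])
--     return tmp
-- ===== SOURCE B (Python) =====
-- def limit_dates(dates, every):
--     return [dates[0]] + dates[1 + every::every]
-- ===== Notes on version B (the rewrite author's own statement) =====
-- stated objective: idiomatic
-- what changed: Replaces the explicit while-loop with a running counter by a single strided slice: [dates[0]] + dates[1+every::every], letting native slicing produce the same indices 1+every, 1+2*every, ... with no loop.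
-- outside the precondition, e.g. on limit_dates([5], 0): A returns [5], B raises ValueError; on limit_dates([5], -1): A returns [5], B returns [5, 5]
import Mathlib
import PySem

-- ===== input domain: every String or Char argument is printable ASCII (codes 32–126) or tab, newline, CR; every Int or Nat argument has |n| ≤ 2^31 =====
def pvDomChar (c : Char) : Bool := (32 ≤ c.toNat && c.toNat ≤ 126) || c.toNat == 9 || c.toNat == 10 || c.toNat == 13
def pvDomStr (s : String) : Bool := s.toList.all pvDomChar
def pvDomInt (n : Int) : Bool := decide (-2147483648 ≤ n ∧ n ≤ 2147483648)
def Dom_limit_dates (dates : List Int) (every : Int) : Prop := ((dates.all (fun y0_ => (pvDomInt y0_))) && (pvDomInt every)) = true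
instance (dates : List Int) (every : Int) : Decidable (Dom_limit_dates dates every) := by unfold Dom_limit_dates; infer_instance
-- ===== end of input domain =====

-- B replaces A's explicit while-loop with a counter by a single strided slice [dates[0]] + dates[1+every::every] (idiomatic; same indices, no loop).


-- ===== PORT A =====
-- The while-loop, as fuel recursion; fuel = dates.length suffices for every ≥ 1 (Pre_),
-- since counter starts at 1 and grows by every ≥ 1 each iteration until it reaches len(dates).
-- dates[counter] is ported as (pyGet? dates counter).getD 0: inside Pre_ the index is always
-- in range, so the default is never used (exact where the Python indexing succeeds).
def limitLoopA (dates : List Int) (n : Int) (every : Int) : Int → Nat → List Int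
  | _, 0 => []
  | c, fuel+1 =>
    if c < n then
      (if c + every < n then [(PySem.List.pyGet? dates (c + every)).getD 0] else []) ++
        limitLoopA dates n every (c + every) fuel
    else []

def limit_dates (dates : List Int) (every : Int) : List Int :=
  ((PySem.List.pyGet? dates 0).getD 0) ::
    limitLoopA dates (dates.length : Int) every 1 dates.length

-- ===== PORT B =====
-- [dates[0]] + dates[1+every::every]; the .getD defaults cover only inputs outside Pre_
-- (empty list / every = 0), where Python B raises.
def limit_dates_alt (dates : List Int) (every : Int) : List Int :=
  ((PySem.List.pyGet? dates 0).getD 0) ::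
    ((PySem.List.slice? dates (some (1 + every)) none every).getD [])

-- ===== PRECONDITION & SPEC =====
-- Pre_ excludes empty dates (A raises IndexError) and every < 1: there A infinite-loops
-- (every = 0) or raises IndexError (every < 0) for lists of length ≥ 2, and on the
-- single-element lists where A does return, B's slice raises (step 0) or strides backwards.
def Pre_limit_dates (dates : List Int) (every : Int) : Prop := dates ≠ [] ∧ 1 ≤ every
instance (dates : List Int) (every : Int) : Decidable (Pre_limit_dates dates every) := by unfold Pre_limit_dates; infer_instance
def pvWitness_limit_dates : List Int × Int := ([3, 1, 4, 1, 5, 9, 2], 2)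

def Spec_limit_dates (dates : List Int) (every : Int) (out : List Int) : Prop := out = limit_dates_alt dates every
instance (dates : List Int) (every : Int) (out : List Int) : Decidable (Spec_limit_dates dates every out) := by unfold Spec_limit_dates; infer_instance

-- ===== CLAIM (what is proved, stated in full; the proofs are below) =====
def Claim_equal_limit_dates : Prop := ∀ (dates : List Int) (every : Int), Dom_limit_dates dates every → Pre_limit_dates dates every → Spec_limit_dates dates every (limit_dates dates every)

-- ===== LEMMAS AND PROOFS =====

-- pyGet? at a nonnegative index is plain optional indexing
theorem pyGet_nonneg (xs : List Int) (i : Int) (h : 0 ≤ i) :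
    PySem.List.pyGet? xs i = xs[i.toNat]? := by
  have hi : i = ((i.toNat : Nat) : Int) := (Int.toNat_of_nonneg h).symm
  rw [hi, PySem.List.pyGet?_natCast]
  have h2 : (((i.toNat : Nat) : Int)).toNat = i.toNat := by omega
  rw [h2]

-- the common index sequence i, i+st, i+2·st, … below n
def idxList (n i st : Int) : List Int :=
  if h : i < n ∧ 1 ≤ st then i :: idxList n (i + st) st else []
termination_by (n - i).toNat
decreasing_by omega

theorem idxList_nil (n i st : Int) (h : ¬ i < n) : idxList n i st = [] := by
  rw [idxList]; simp [h]

theorem idxList_cons (n i st : Int) (h : i < n) (hst : 1 ≤ st) :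
    idxList n i st = i :: idxList n (i + st) st := by
  rw [idxList]; simp [h, hst]

-- A's loop produces exactly the dates at indices counter+every, counter+2·every, … < n
theorem loop_eq (dates : List Int) (every : Int) (hev : 1 ≤ every) :
    ∀ (fuel : Nat) (c : Int),
      (((dates.length : Int)) - c).toNat ≤ fuel →
      limitLoopA dates (dates.length : Int) every c fuel =
        (idxList (dates.length : Int) (c + every) every).map
          (fun j => (PySem.List.pyGet? dates j).getD 0) := by
  intro fuel
  induction fuel with
  | zero =>
    intro c hc
    have hcn : ¬ c + every < (dates.length : Int) := by omega
    rw [limitLoopA, idxList_nil _ _ _ hcn]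
    simp
  | succ m ih =>
    intro c hc
    rw [limitLoopA]
    by_cases h1 : c < (dates.length : Int)
    · rw [if_pos h1]
      by_cases h2 : c + every < (dates.length : Int)
      · rw [if_pos h2, idxList_cons _ _ _ h2 hev, List.map_cons]
        rw [ih (c + every) (by omega)]
        simp
      · rw [if_neg h2, idxList_nil _ _ _ h2]
        rw [ih (c + every) (by omega)]
        rw [idxList_nil _ _ _ (by omega)]
        simp
    · rw [if_neg h1, idxList_nil _ _ _ (by omega)]
      simp

-- the count step: one more element at i than at i + st
theorem cnt_succ (n i st : Int) (hst : 1 ≤ st) (h : i < n) :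
    ((n - i + st - 1) / st).toNat =
      (if i + st < n then ((n - (i + st) + st - 1) / st).toNat else 0) + 1 := by
  have hstne : st ≠ 0 := by omega
  have key : (n - i + st - 1) / st = (n - i - 1) / st + 1 := by
    have := Int.add_mul_ediv_right (n - i - 1) 1 hstne
    have he : n - i + st - 1 = n - i - 1 + 1 * st := by ring
    rw [he, this]
  by_cases h2 : i + st < n
  · rw [if_pos h2]
    have he2 : n - (i + st) + st - 1 = n - i - 1 := by ring
    rw [he2, key]
    have hnn : 0 ≤ (n - i - 1) / st := Int.ediv_nonneg (by omega) (by omega)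
    omega
  · rw [if_neg h2]
    have hz : (n - i - 1) / st = 0 := Int.ediv_eq_zero_of_lt (by omega) (by omega)
    rw [key, hz]
    simp

-- the slice's filterMap over range(count) is the map over the index sequence
theorem filt_eq (xs : List Int) (st : Int) (hst : 1 ≤ st) :
    ∀ (m : Nat) (i : Int), 0 ≤ i → (((xs.length : Int)) - i).toNat ≤ m →
      (List.range (if i < (xs.length : Int)
          then (((xs.length : Int) - i + st - 1) / st).toNat else 0)).filterMap
          (fun (k : Nat) => xs[(i + st * (k : Int)).toNat]?) =
        (idxList (xs.length : Int) i st).map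
          (fun j => (PySem.List.pyGet? xs j).getD 0) := by
  intro m
  induction m with
  | zero =>
    intro i hi hm
    have h : ¬ i < (xs.length : Int) := by omega
    rw [if_neg h, idxList_nil _ _ _ h]
    simp
  | succ m ih =>
    intro i hi hm
    by_cases h : i < (xs.length : Int)
    · rw [if_pos h, cnt_succ _ _ _ hst h, List.range_succ_eq_map, List.filterMap_cons,
        List.filterMap_map]
      have hidx : i.toNat < xs.length := by omega
      have h0 : xs[(i + st * ((0 : Nat) : Int)).toNat]? = some xs[i.toNat] := by
        simp [List.getElem?_eq_getElem hidx]
      rw [h0]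
      have hfun : ((fun (k : Nat) => xs[(i + st * (k : Int)).toNat]?) ∘ Nat.succ) =
          (fun k : Nat => xs[((i + st) + st * (k : Int)).toNat]?) := by
        funext k
        have : i + st * ((k : Int) + 1) = (i + st) + st * (k : Int) := by ring
        simp [Function.comp, this]
      rw [hfun, ih (i + st) (by omega) (by omega), idxList_cons _ _ _ h hst, List.map_cons,
        pyGet_nonneg xs i hi, List.getElem?_eq_getElem hidx]
      simp
    · rw [if_neg h, idxList_nil _ _ _ h]
      simp

-- the strided slice equals the map over the index sequence
theorem slice_eq (xs : List Int) (i st : Int) (hi : 0 ≤ i) (hst : 1 ≤ st) :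
    PySem.List.slice? xs (some i) none st =
      some ((idxList (xs.length : Int) i st).map
        (fun j => (PySem.List.pyGet? xs j).getD 0)) := by
  have hne : ¬ st = 0 := by omega
  have hneg : ¬ st < 0 := by omega
  have hpos : 0 < st := by omega
  by_cases h : i < (xs.length : Int)
  · have hmin : min i (xs.length : Int) = i := by omega
    have hni : ¬ i < 0 := by omega
    simp only [PySem.List.slice?, PySem.List.sliceIndices, hne, hneg, hpos, if_false,
      if_true, if_neg hni, hmin]
    rw [if_pos h]
    have := filt_eq xs st hst (((xs.length : Int)) - i).toNat i hi (le_refl _)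
    rw [if_pos h] at this
    rw [this]
  · have hmin : min i (xs.length : Int) = (xs.length : Int) := by omega
    have hni : ¬ i < 0 := by omega
    simp only [PySem.List.slice?, PySem.List.sliceIndices, hne, hneg, hpos, if_false,
      if_true, if_neg hni, hmin]
    rw [if_neg (lt_irrefl _), idxList_nil _ _ _ h]
    simp

-- ===== VERDICT (by name: the statement is the Claim_ definition above) =====
theorem limit_dates_spec : Claim_equal_limit_dates := by
  intro dates every _ hpre
  obtain ⟨_, hev⟩ := hpre
  show limit_dates dates every = limit_dates_alt dates every
  unfold limit_dates limit_dates_alt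
  rw [loop_eq dates every hev dates.length 1 (by omega),
    slice_eq dates (1 + every) every (by omega) hev]
  simp [add_comm]
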